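-- pv_equiv track=rewrite | github.com/mukerem/ICPC-Journey | ICPC WF 2021 Dhaka Practice /kattis_hexagonal_rooks.py | move5
-- ===== SOURCE A (Python) =====
-- def good(a, b):
--     if a < 1 or a > 11 or b < 1 or b > 11:
--         return False
--     a = abs(a-6)
--     if a + b > 11:
--         return False
--     return True
--
-- def move5(a, b):
--     c = []
--     u, v = 0, 1
--     while 1:
--         a += u
--         b += v
--         if not good(a, b):
--             break
--         c.append((a, b))
--     return c
-- ===== SOURCE B (Python) =====
-- def move5(a, b):
--     if a < 1 or a > 11:
--         return []
--     start = b + 1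
--     if start < 1:
--         return []
--     upper = 11 - abs(a - 6)
--     return [(a, bb) for bb in range(start, upper + 1)]
-- ===== Notes on version B (the rewrite author's own statement) =====
-- stated objective: simpler
-- what changed: Replaces the step-by-step while loop with a per-step good() validity check by a closed-form bound (upper = 11 - abs(a-6)) and a single range comprehension.
import Mathlib
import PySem

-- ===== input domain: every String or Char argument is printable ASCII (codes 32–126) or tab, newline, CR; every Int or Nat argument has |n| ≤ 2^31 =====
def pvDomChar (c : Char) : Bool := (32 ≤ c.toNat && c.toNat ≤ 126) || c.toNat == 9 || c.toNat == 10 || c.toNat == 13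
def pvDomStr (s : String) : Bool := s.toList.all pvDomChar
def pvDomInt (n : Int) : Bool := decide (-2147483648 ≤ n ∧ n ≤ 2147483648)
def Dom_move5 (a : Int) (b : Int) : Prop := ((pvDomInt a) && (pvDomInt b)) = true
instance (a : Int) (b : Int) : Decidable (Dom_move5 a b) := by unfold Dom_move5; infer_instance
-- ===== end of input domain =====

-- B replaces A's cell-by-cell while loop (validity test per step) by a closed-form
-- upper bound and one range comprehension; same return value, no speed claim.

-- ===== PORT A =====
def good (a : Int) (b : Int) : Bool :=
  if a < 1 ∨ a > 11 ∨ b < 1 ∨ b > 11 then false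
  else if |a - 6| + b > 11 then false
  else true

-- the while loop of move5: direction (u,v) = (0,1), so only b advances
def move5Loop (a : Int) (b : Int) (c : List (Int × Int)) : List (Int × Int) :=
  if good a (b + 1) then move5Loop a (b + 1) (c ++ [(a, b + 1)]) else c
termination_by (12 - b).toNat
decreasing_by
  have hgood : good a (b + 1) = true := by assumption
  have hb : b + 1 ≤ 11 := by
    unfold good at hgood
    split at hgood
    · exact absurd hgood (by simp)
    · rename_i h; omega
  omega

def move5 (a : Int) (b : Int) : List (Int × Int) := move5Loop a b []

-- ===== PORT B =====
def move5_alt (a : Int) (b : Int) : List (Int × Int) :=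
  if a < 1 ∨ a > 11 then []
  else if b + 1 < 1 then []
  else (PySem.List.pyRange (b + 1) ((11 - |a - 6|) + 1) 1).map (fun bb => (a, bb))

-- ===== PRECONDITION & SPEC =====
def Spec_move5 (a : Int) (b : Int) (out : List (Int × Int)) : Prop := out = move5_alt a b
instance (a : Int) (b : Int) (out : List (Int × Int)) : Decidable (Spec_move5 a b out) := by unfold Spec_move5; infer_instance

-- ===== CLAIM (what is proved, stated in full; the proofs are below) =====
def Claim_equal_move5 : Prop := ∀ (a : Int) (b : Int), Dom_move5 a b → Spec_move5 a b (move5 a b)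

-- ===== LEMMAS AND PROOFS =====

theorem good_iff (a b : Int) : good a b = true ↔ (1 ≤ a ∧ a ≤ 11 ∧ 1 ≤ b ∧ b ≤ 11 ∧ |a - 6| + b ≤ 11) := by
  unfold good
  split
  · rename_i h; constructor
    · intro hf; exact absurd hf (by simp)
    · intro ⟨h1, h2, h3, h4, _⟩; omega
  · rename_i h
    split
    · rename_i h2; constructor
      · intro hf; exact absurd hf (by simp)
      · intro ⟨_, _, _, _, h5⟩; omega
    · rename_i h2; simp; omega

theorem move5Loop_eq_alt (a b : Int) (c : List (Int × Int)) :
    move5Loop a b c = c ++ move5_alt a b := by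
  by_cases hg : good a (b + 1) = true
  · have hiff := (good_iff a (b + 1)).mp hg
    rw [move5Loop, if_pos hg, move5Loop_eq_alt a (b + 1)]
    unfold move5_alt
    rw [if_neg (by omega), if_neg (by omega), if_neg (by omega), if_neg (by omega)]
    rw [PySem.List.pyRange_one_cons (by omega : b + 1 < (11 - |a - 6|) + 1)]
    simp
  · rw [move5Loop, if_neg hg]
    unfold move5_alt
    rw [good_iff] at hg
    split
    · simp
    · rename_i h1
      split
      · simp
      · rename_i h2
        have hf : (0:Int) ≤ |a - 6| := abs_nonneg _
        have key : (11 - |a - 6|) + 1 ≤ b + 1 := by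
          by_contra hlt
          exact hg ⟨by omega, by omega, by omega, by omega, by omega⟩
        rw [PySem.List.pyRange_one_eq_nil key]
        simp
termination_by (12 - b).toNat
decreasing_by
  have := (good_iff a (b + 1)).mp (by assumption)
  omega

-- ===== VERDICT (by name: the statement is the Claim_ definition above) =====
theorem move5_spec : Claim_equal_move5 := by
  intro a b _
  unfold Spec_move5 move5
  rw [move5Loop_eq_alt]
  simp
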